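-- pv_equiv track=rewrite | github.com/slightknack/snatcher | main.py | group_arms
-- ===== SOURCE A (Python) =====
-- def group_arms(arms):
--     assert len(arms) > 0, "Function needs at least one arm"
--     group = []
--     last = [arms[0]]
--     for arm in arms[1:]:
--         if arm.startswith(" "):
--             last.append(arm)
--         else:
--             group.append(last)
--             last = [arm]
--     group.append(last)
--     return list(map(split_arm, group))
--
-- def split_arm(arms):
--     leading, *trailing = arms
--     pattern, expr = leading.split(":")
--     pattern = pattern.strip()
--     expr = expr.strip()
--     return (pattern, [expr] + trailing)
-- ===== SOURCE B (Python) =====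
-- def group_arms(arms):
--     assert len(arms) > 0, "Function needs at least one arm"
--     bounds = [0] + [i for i in range(1, len(arms)) if not arms[i].startswith(" ")] + [len(arms)]
--     groups = [arms[b:e] for b, e in zip(bounds, bounds[1:])]
--     return [split_arm(g) for g in groups]
--
-- def split_arm(arms):
--     leading, *trailing = arms
--     pattern, expr = leading.split(":")
--     pattern = pattern.strip()
--     expr = expr.strip()
--     return (pattern, [expr] + trailing)
-- ===== Notes on version B (the rewrite author's own statement) =====
-- stated objective: alternative
-- what changed: Replaces the stateful accumulate-and-flush loop with an index-based pass: collect boundary indices (0, each non-indented position, and a length sentinel), slice the list between consecutive boundaries, and map split_arm over the slices.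
import Mathlib
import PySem

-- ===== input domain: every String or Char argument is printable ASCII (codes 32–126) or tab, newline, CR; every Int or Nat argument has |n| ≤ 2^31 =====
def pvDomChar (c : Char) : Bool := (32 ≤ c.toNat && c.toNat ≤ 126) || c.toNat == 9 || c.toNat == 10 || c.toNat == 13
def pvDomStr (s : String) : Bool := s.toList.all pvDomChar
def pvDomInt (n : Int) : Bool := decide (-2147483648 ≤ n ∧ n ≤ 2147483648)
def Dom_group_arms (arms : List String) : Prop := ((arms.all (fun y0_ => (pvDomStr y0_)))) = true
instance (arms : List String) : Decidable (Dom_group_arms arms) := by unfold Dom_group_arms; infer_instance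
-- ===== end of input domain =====

-- B changes the decomposition: boundary indices + slicing between consecutive boundaries, instead of an accumulating loop; same cost.

-- ===== PORT A =====
-- split_arm: 'leading, *trailing = arms' and 'pattern, expr = leading.split(":")'.
-- Python raises on an empty group / a leading line without exactly one ':'; those inputs are
-- excluded by Pre_, so the fallback branches below are unreachable there.
def split_arm (g : List String) : String × List String :=
  match g with
  | [] => ("", [])
  | leading :: trailing =>
    match PySem.Str.split? leading ":" with
    | some [pattern, expr] => (PySem.Str.strip pattern, PySem.Str.strip expr :: trailing)
    | _ => ("", [])

def group_arms (arms : List String) : List (String × List String) :=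
  match arms with
  | [] => []   -- 'assert len(arms) > 0' fails in Python; excluded by Pre_
  | a0 :: rest =>
    let st := rest.foldl
      (fun (gl : List (List String) × List String) arm =>
        if PySem.Str.startswith arm " " then (gl.1, gl.2 ++ [arm])
        else (gl.1 ++ [gl.2], [arm]))
      ([], [a0])
    (st.1 ++ [st.2]).map split_arm

-- ===== PORT B =====
def split_arm_b (g : List String) : String × List String :=
  match g with
  | [] => ("", [])
  | leading :: trailing =>
    match PySem.Str.split? leading ":" with
    | some [pattern, expr] => (PySem.Str.strip pattern, PySem.Str.strip expr :: trailing)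
    | _ => ("", [])

def group_arms_alt (arms : List String) : List (String × List String) :=
  let n : Int := (arms.length : Int)
  let bounds : List Int :=
    0 :: ((PySem.List.pyRange 1 n 1).filter
            (fun i => !(PySem.Str.startswith (PySem.List.pyGetD arms i "") " ")) ++ [n])
  let groups := (bounds.zip bounds.tail).map
    (fun be => PySem.List.slice arms (some be.1) (some be.2))
  groups.map split_arm_b

-- ===== PRECONDITION & SPEC =====
-- Pre_ excludes exactly the inputs on which Python A raises: the empty list (the assert fails) and
-- inputs where some group's leading line (arms[0], or a later line not starting with a space) does
-- not contain exactly one ':' (the 'pattern, expr = leading.split(":")' unpacking raises ValueError).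
def Pre_group_arms (arms : List String) : Prop :=
  arms ≠ [] ∧
    ∀ s ∈ arms.headD "" :: arms.tail.filter (fun t => !(PySem.Str.startswith t " ")),
      PySem.Str.count s ":" = 1
instance (arms : List String) : Decidable (Pre_group_arms arms) := by
  unfold Pre_group_arms; infer_instance

def pvWitness_group_arms : List String := ["a: 1", " b", "c : 2"]

def Spec_group_arms (arms : List String) (out : List (String × List String)) : Prop := out = group_arms_alt arms
instance (arms : List String) (out : List (String × List String)) : Decidable (Spec_group_arms arms out) := by unfold Spec_group_arms; infer_instance

-- ===== CLAIM (what is proved, stated in full; the proofs are below) =====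
def Claim_equal_group_arms : Prop := ∀ (arms : List String), Dom_group_arms arms → Pre_group_arms arms → Spec_group_arms arms (group_arms arms)

-- ===== LEMMAS AND PROOFS =====

-- the structural grouping both ports are reduced to
def grp (cur : List String) : List String → List (List String)
  | [] => [cur]
  | x :: xs =>
    if PySem.Str.startswith x " " then grp (cur ++ [x]) xs
    else cur :: grp [x] xs

lemma foldA (l : List String) (g : List (List String)) (last : List String) :
    (l.foldl
      (fun (gl : List (List String) × List String) arm =>
        if PySem.Str.startswith arm " " then (gl.1, gl.2 ++ [arm])
        else (gl.1 ++ [gl.2], [arm]))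
      (g, last)).1 ++
      [(l.foldl
        (fun (gl : List (List String) × List String) arm =>
          if PySem.Str.startswith arm " " then (gl.1, gl.2 ++ [arm])
          else (gl.1 ++ [gl.2], [arm]))
        (g, last)).2] = g ++ grp last l := by
  induction l generalizing g last with
  | nil => simp [grp]
  | cons x xs ih =>
    cases h : PySem.Str.startswith x " " with
    | true =>
      simp only [List.foldl_cons, grp, h, if_true]
      exact ih g (last ++ [x])
    | false =>
      simp only [List.foldl_cons, grp, h, Bool.false_eq_true, if_false]
      rw [ih (g ++ [last]) [x], List.append_assoc]
      rfl

-- boundary indices within l (0-based)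
def bnds (l : List String) : List Nat :=
  (List.range l.length).filter (fun i => !(PySem.Str.startswith (l.getD i "") " "))

def mkSegs (full : List String) (bs : List Nat) : List (List String) :=
  (bs.zip bs.tail).map (fun ab => (full.drop ab.1).take (ab.2 - ab.1))

lemma mkSegs_cons_cons (full : List String) (a b : Nat) (bs : List Nat) :
    mkSegs full (a :: b :: bs) = (full.drop a).take (b - a) :: mkSegs full (b :: bs) := by
  simp [mkSegs]

lemma bnds_cons_of_sw (x : String) (xs : List String)
    (h : PySem.Str.startswith x " " = true) :
    bnds (x :: xs) = (bnds xs).map (· + 1) := by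
  have h' : PySem.Chars.startswith x.toList [' '] = true := by simpa using h
  simp [bnds, List.range_succ_eq_map, h', List.filter_map,
    Function.comp_def]

lemma bnds_cons_of_not_sw (x : String) (xs : List String)
    (h : PySem.Str.startswith x " " = false) :
    bnds (x :: xs) = 0 :: (bnds xs).map (· + 1) := by
  have h' : PySem.Chars.startswith x.toList [' '] = false := by simpa using h
  simp [bnds, List.range_succ_eq_map, h', List.filter_map,
    Function.comp_def]

lemma mkSegs_shift (pre l : List String) (bs : List Nat) :
    mkSegs (pre ++ l) (bs.map (· + pre.length)) = mkSegs l bs := by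
  induction bs with
  | nil => simp [mkSegs]
  | cons a bs ih =>
    cases bs with
    | nil => simp [mkSegs]
    | cons b bs' =>
      simp only [List.map_cons] at ih ⊢
      rw [mkSegs_cons_cons, mkSegs_cons_cons, ih]
      congr 1
      have hd : (pre ++ l).drop (a + pre.length) = l.drop a := by
        have h1 : pre.length + a - pre.length = a := by omega
        rw [Nat.add_comm]
        simp [List.drop_append, h1, List.drop_eq_nil_of_le]
      rw [hd]
      congr 1
      omega

lemma segs_eq_grp (rest : List String) : ∀ (cur : List String),
    mkSegs (cur ++ rest)
      (0 :: ((bnds rest).map (· + cur.length) ++ [cur.length + rest.length])) =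
      grp cur rest := by
  induction rest with
  | nil =>
    intro cur
    simp [bnds, mkSegs, grp]
  | cons x xs ih =>
    intro cur
    cases h : PySem.Str.startswith x " " with
    | true =>
      rw [bnds_cons_of_sw x xs h]
      have e1 : ((bnds xs).map (· + 1)).map (· + cur.length)
          = (bnds xs).map (· + (cur ++ [x]).length) := by
        simp only [List.map_map, Function.comp_def, List.length_append, List.length_singleton]
        exact List.map_congr_left (fun a _ => by omega)
      have e2 : cur ++ x :: xs = (cur ++ [x]) ++ xs := by simp
      have e3 : cur.length + (x :: xs).length = (cur ++ [x]).length + xs.length := by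
        simp; omega
      rw [e1, e2, e3, ih (cur ++ [x])]
      have h' : PySem.Chars.startswith x.toList [' '] = true := by simpa using h
      simp [grp, h']
    | false =>
      have h' : PySem.Chars.startswith x.toList [' '] = false := by simpa using h
      rw [bnds_cons_of_not_sw x xs h]
      simp only [List.map_cons, List.cons_append, Nat.zero_add]
      rw [mkSegs_cons_cons]
      have hseg1 : ((cur ++ x :: xs).drop 0).take (cur.length - 0) = cur := by
        simp [List.take_left']
      have hbs : (cur.length :: (((bnds xs).map (· + 1)).map (· + cur.length) ++
            [cur.length + (x :: xs).length]))
          = ((0 :: ((bnds xs).map (· + 1) ++ [1 + xs.length])).map (· + cur.length)) := by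
        simp [Function.comp_def, Nat.add_comm, Nat.add_left_comm]
      rw [hseg1, hbs, mkSegs_shift cur (x :: xs)]
      have := ih [x]
      simp only [List.length_singleton, List.singleton_append] at this
      rw [this]
      simp [grp, h']

lemma split_arm_b_eq : split_arm_b = split_arm := rfl

lemma altEq (a0 : String) (rest : List String) :
    group_arms_alt (a0 :: rest) = (grp [a0] rest).map split_arm_b := by
  have hrange : PySem.List.pyRange 1 (((a0 :: rest).length : Nat) : Int) 1
      = (List.range rest.length).map (fun k => ((k + 1 : Nat) : Int)) := by
    rw [PySem.List.pyRange_one]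
    have hl : ((((a0 :: rest).length : Nat) : Int) - 1).toNat = rest.length := by
      simp
    rw [hl]
    exact List.map_congr_left (fun k _ => by push_cast; ring)
  have hfilter : ((List.range rest.length).map (fun k => ((k + 1 : Nat) : Int))).filter
        (fun i => !(PySem.Str.startswith (PySem.List.pyGetD (a0 :: rest) i "") " "))
      = (bnds rest).map (fun k => ((k + 1 : Nat) : Int)) := by
    rw [List.filter_map]
    unfold bnds
    congr 1
    apply List.filter_congr
    intro k _
    simp only [Function.comp_def, PySem.List.pyGetD_natCast]
    simp
  have hzip : ∀ (bs : List Nat),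
      (((bs.map (fun n : Nat => (n : Int))).zip (bs.map (fun n : Nat => (n : Int))).tail).map
        (fun be => PySem.List.slice (a0 :: rest) (some be.1) (some be.2)))
      = mkSegs (a0 :: rest) bs := by
    intro bs
    rw [← List.map_tail, List.zip_map, List.map_map]
    unfold mkSegs
    apply List.map_congr_left
    intro ab _
    simp [Prod.map, PySem.List.slice_natCast]
  have hmain := segs_eq_grp rest [a0]
  simp only [List.length_singleton, List.singleton_append] at hmain
  simp only [group_arms_alt, hrange, hfilter]
  have hb : (0 : Int) :: ((bnds rest).map (fun k => ((k + 1 : Nat) : Int)) ++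
        [(((a0 :: rest).length : Nat) : Int)])
      = ((0 :: ((bnds rest).map (· + 1) ++ [1 + rest.length])).map (fun n : Nat => (n : Int))) := by
    simp [List.map_map, Function.comp_def, Nat.add_comm]
  rw [hb, hzip, hmain]

theorem group_arms_spec : Claim_equal_group_arms := by
  intro arms _ hpre
  unfold Spec_group_arms
  obtain ⟨hne, -⟩ := hpre
  obtain ⟨a0, rest, rfl⟩ : ∃ a0 rest, arms = a0 :: rest := by
    cases arms with
    | nil => exact absurd rfl hne
    | cons a r => exact ⟨a, r, rfl⟩
  rw [altEq, split_arm_b_eq]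
  simp only [group_arms]
  rw [foldA rest [] [a0], List.nil_append]
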